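-- pv_equiv track=rewrite | github.com/paarth-r/rajpal_paarth_my_game_spr2026 | level_editor.py | new_bordered_map
-- ===== SOURCE A (Python) =====
-- def new_bordered_map(cols: int = 42, rows: int = 24) -> list[str]:
--     """Rectangle of walkable floor with wall border."""
--     cols = max(8, cols)
--     rows = max(8, rows)
--     inner = "." * (cols - 2)
--     lines = ["1" * cols]
--     for _ in range(rows - 2):
--         lines.append("1" + inner + "1")
--     lines.append("1" * cols)
--     return lines
-- ===== SOURCE B (Python) =====
-- def new_bordered_map(cols: int = 42, rows: int = 24) -> list[str]:
--     """Rectangle of walkable floor with wall border (fill grid, then paint borders)."""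
--     cols = max(8, cols)
--     rows = max(8, rows)
--     grid = [bytearray(b"." * cols) for _ in range(rows)]
--     grid[0] = bytearray(b"1" * cols)
--     grid[rows - 1] = bytearray(b"1" * cols)
--     for row in grid:
--         row[0] = ord("1")
--         row[cols - 1] = ord("1")
--     result = []
--     while grid:
--         result.append(grid.pop().decode("ascii"))
--     result.reverse()
--     return result
-- ===== Notes on version B (the rewrite author's own statement) =====
-- stated objective: alternative
-- what changed: B builds a full 2-D mutable byte grid of floor cells and then paints the borders in a second pass (overwrite first/last row and first/last column) before joining rows into strings, instead of A's direct row-by-row string emission.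
import Mathlib
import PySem

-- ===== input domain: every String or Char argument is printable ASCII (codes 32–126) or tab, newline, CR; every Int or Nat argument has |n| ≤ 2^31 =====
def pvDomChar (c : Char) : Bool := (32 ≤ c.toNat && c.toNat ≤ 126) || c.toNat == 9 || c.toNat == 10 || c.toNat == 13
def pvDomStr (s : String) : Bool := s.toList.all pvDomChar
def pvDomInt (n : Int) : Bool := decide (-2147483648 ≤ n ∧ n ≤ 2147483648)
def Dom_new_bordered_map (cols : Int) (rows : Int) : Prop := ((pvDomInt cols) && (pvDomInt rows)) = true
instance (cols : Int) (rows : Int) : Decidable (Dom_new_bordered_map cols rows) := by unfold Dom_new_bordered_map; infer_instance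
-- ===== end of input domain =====

-- B builds a full 2-D character grid of '.' cells and then paints the borders in a
-- second pass, instead of A's direct row-by-row string emission; objective: alternative.


-- ===== PORT A =====
-- literal transliteration of A: emit top wall string, then loop appending the
-- interior row string rows-2 times, then the bottom wall string.
def new_bordered_map (cols : Int) (rows : Int) : List String :=
  let cols := max 8 cols
  let rows := max 8 rows
  let inner : List Char := PySem.List.pyRepeat ['.'] (cols - 2)
  let lines : List String := [String.mk (PySem.List.pyRepeat ['1'] cols)]
  let lines := (PySem.List.pyRange 0 (rows - 2) 1).foldl
    (fun ls _ => ls ++ [String.mk ('1' :: inner ++ ['1'])]) lines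
  lines ++ [String.mk (PySem.List.pyRepeat ['1'] cols)]

-- ===== PORT B =====
-- transliteration of Source B: build grid of '.' rows, overwrite first/last row,
-- then set first/last column of every row, then pop rows off the grid decoding
-- each (so the loop visits rows back-to-front) and reverse the result.
def new_bordered_map_alt (cols : Int) (rows : Int) : List String :=
  let cols := max 8 cols
  let rows := max 8 rows
  let grid : List (List Char) :=
    (PySem.List.pyRange 0 rows 1).map (fun _ => PySem.List.pyRepeat ['.'] cols)
  let grid := grid.set 0 (PySem.List.pyRepeat ['1'] cols)
  let grid := grid.set (rows - 1).toNat (PySem.List.pyRepeat ['1'] cols)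
  let grid := grid.map (fun row => (row.set 0 '1').set (cols - 1).toNat '1')
  let result := grid.reverse.foldl (fun acc row => acc ++ [String.mk row]) ([] : List String)
  result.reverse

-- ===== PRECONDITION & SPEC =====
def Spec_new_bordered_map (cols : Int) (rows : Int) (out : List String) : Prop := out = new_bordered_map_alt cols rows
instance (cols : Int) (rows : Int) (out : List String) : Decidable (Spec_new_bordered_map cols rows out) := by unfold Spec_new_bordered_map; infer_instance

-- ===== CLAIM (what is proved, stated in full; the proofs are below) =====
def Claim_equal_new_bordered_map : Prop := ∀ (cols : Int) (rows : Int), Dom_new_bordered_map cols rows → Spec_new_bordered_map cols rows (new_bordered_map cols rows)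

-- ===== LEMMAS AND PROOFS =====

-- a loop that appends a constant element once per iteration makes a replicate
theorem foldl_append_const {α β : Type} (L : List α) (x : β) :
    ∀ init : List β, L.foldl (fun ls _ => ls ++ [x]) init = init ++ List.replicate L.length x := by
  induction L with
  | nil => simp
  | cons a t ih => intro init; simp [List.foldl, ih, List.replicate_succ]

-- a loop that pops each element and appends f of it makes a map
theorem foldl_append_map {α β : Type} (L : List α) (f : α → β) :
    ∀ init : List β, L.foldl (fun acc x => acc ++ [f x]) init = init ++ L.map f := by
  induction L with
  | nil => simp
  | cons a t ih => intro init; simp [List.foldl, ih]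

-- setting the last cell of a replicate
theorem set_replicate_last {α : Type} (x y : α) :
    ∀ k : Nat, 0 < k → (List.replicate k x).set (k - 1) y = List.replicate (k - 1) x ++ [y] := by
  intro k
  induction k with
  | zero => intro h; omega
  | succ k ih =>
    intro _
    cases k with
    | zero => simp
    | succ m =>
      have := ih (by omega)
      simp only [List.replicate_succ, Nat.add_sub_cancel] at *
      simpa [List.set] using this

theorem main_eq : ∀ (cols rows : Int), new_bordered_map cols rows = new_bordered_map_alt cols rows := by
  intro cols rows
  unfold new_bordered_map new_bordered_map_alt
  have hc : (8 : Int) ≤ max 8 cols := le_max_left _ _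
  have hr : (8 : Int) ≤ max 8 rows := le_max_left _ _
  set c := max 8 cols with hcdef
  set r := max 8 rows with hrdef
  obtain ⟨j, hj⟩ : ∃ j, c.toNat = j + 2 := ⟨c.toNat - 2, by omega⟩
  obtain ⟨k, hk⟩ : ∃ k, r.toNat = k + 2 := ⟨r.toNat - 2, by omega⟩
  have h1 : (r - 2 - 0).toNat = k := by omega
  have h2 : (r - 1).toNat = k + 1 := by omega
  have h3 : (c - 1).toNat = j + 1 := by omega
  have h4 : (c - 2).toNat = j := by omega
  have h5 : (r - 0).toNat = k + 2 := by omega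
  have e1 : ∀ (x y : List Char), (x :: List.replicate k x).set k y = List.replicate k x ++ [y] := by
    intro x y
    simpa [List.replicate_succ] using set_replicate_last x y (k+1) (by omega)
  have e2 : ∀ (x y : Char), (x :: List.replicate j x).set j y = List.replicate j x ++ [y] := by
    intro x y
    simpa [List.replicate_succ] using set_replicate_last x y (j+1) (by omega)
  simp only [PySem.List.pyRepeat_singleton, foldl_append_const, foldl_append_map,
    PySem.List.length_pyRange_one, List.map_const', List.nil_append, List.map_reverse,
    List.reverse_reverse, h1, h2, h3, h4, h5, hj]
  simp only [List.replicate_succ, List.set_cons_zero, List.set_cons_succ, e1, e2,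
    List.map_cons, List.map_append, List.map_replicate]
  simp
  congr 1
  rw [← List.replicate_succ']
  simp [← List.replicate_succ]

-- ===== VERDICT (by name: the statement is the Claim_ definition above) =====
theorem new_bordered_map_spec : Claim_equal_new_bordered_map := by
  intro cols rows _
  unfold Spec_new_bordered_map
  exact main_eq cols rows
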